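-- pv_equiv track=rewrite | github.com/FalseNegativeLab/mlscorecheck | mlscorecheck/aggregated/_folds.py | determine_fold_configurations
-- ===== SOURCE A (Python) =====
-- def stratified_configurations_sklearn(p, n, n_splits):
--     """
--     The sklearn stratification strategy
--
--     Args:
--         p (int): number of positives
--         n (int): number of negatives
--         n_splits (int): the number of splits
--
--     Returns:
--         list(tuple): the list of the structure of the folds
--     """
--     p_base = p // n_splits
--     n_base = n // n_splits
--     p_remainder = p % n_splits
--     n_remainder = n % n_splits
--
--     results = [(n_base, p_base)] * n_splits
--
--     idx = 0
--     while n_remainder > 0: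
--         results[idx] = (results[idx][0] + 1, results[idx][1])
--         n_remainder -= 1
--         idx += 1
--         idx %= n_splits
--     while p_remainder > 0:
--         results[idx] = (results[idx][0], results[idx][1] + 1)
--         p_remainder -= 1
--         idx += 1
--         idx %= n_splits
--
--     return results
--
-- def determine_fold_configurations(p, n, n_folds, n_repeats, folding='stratified_sklearn'):
--     """
--     Determine fold configurations according to a folding
--
--     Args:
--         p (int): the number of positives
--         n (int): the number of negatives
--         n_folds (int): the number of folds
--         n_repeats (int): the number of repeats
--         folding (str): 'stratified_sklearn' - the folding strategy
--     """
--     if folding == 'stratified_sklearn':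
--         confs = stratified_configurations_sklearn(p=p, n=n, n_splits=n_folds)
--         confs = [{'n': conf[0], 'p': conf[1]} for conf in confs]
--         results = []
--         for _ in range(n_repeats):
--             for item in confs:
--                 results.append({**item})
--     else:
--         raise ValueError(f'folding strategy {folding} is not supported yet')
--
--     return results
-- ===== SOURCE B (Python) =====
-- def determine_fold_configurations(p, n, n_folds, n_repeats, folding='stratified_sklearn'):
--     if folding != 'stratified_sklearn':
--         raise ValueError(f'folding strategy {folding} is not supported yet')
--     p_base, p_rem = divmod(p, n_folds)
--     n_base, n_rem = divmod(n, n_folds)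
--     return [{'n': n_base + (i < n_rem), 'p': p_base + ((i - n_rem) % n_folds < p_rem)}
--             for _ in range(n_repeats) for i in range(n_folds)]
-- ===== Notes on version B (the rewrite author's own statement) =====
-- stated objective: simpler
-- what changed: B replaces A's helper's two stateful rotating while-loops over a mutated list by a single comprehension that computes each fold directly from divmod bases and a per-index modular remainder test.
import Mathlib
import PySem

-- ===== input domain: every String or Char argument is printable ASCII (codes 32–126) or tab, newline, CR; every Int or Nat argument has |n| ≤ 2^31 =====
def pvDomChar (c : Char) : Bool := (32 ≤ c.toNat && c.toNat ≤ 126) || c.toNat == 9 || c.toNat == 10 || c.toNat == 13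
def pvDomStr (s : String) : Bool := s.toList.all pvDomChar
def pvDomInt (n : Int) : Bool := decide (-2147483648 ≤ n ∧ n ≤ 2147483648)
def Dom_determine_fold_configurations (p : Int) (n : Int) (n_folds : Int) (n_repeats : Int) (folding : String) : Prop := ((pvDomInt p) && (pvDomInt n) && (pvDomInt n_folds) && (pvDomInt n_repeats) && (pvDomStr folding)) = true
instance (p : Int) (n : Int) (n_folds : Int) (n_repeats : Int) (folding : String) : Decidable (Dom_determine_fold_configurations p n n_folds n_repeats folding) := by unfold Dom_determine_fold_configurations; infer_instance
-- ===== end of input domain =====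

-- B replaces A's two rotating while-loops by a closed per-index formula (objective: simpler).

-- ===== PORT A =====
-- first while loop of stratified_configurations_sklearn: hand the extra negatives out, rotating idx.
-- results[idx] is read/written via .toNat indexing: exact on every admitted input, since whenever the
-- loop body runs Pre_ gives 0 < n_splits and then 0 ≤ idx < n_splits = results.length.
def scsNLoop (results : List (Int × Int)) (rem : Int) (idx : Int) (n_splits : Int) :
    List (Int × Int) × Int :=
  if 0 < rem then
    let r := results.getD idx.toNat (0, 0)
    scsNLoop (results.set idx.toNat (r.1 + 1, r.2)) (rem - 1)
      (PySem.Int.mod (idx + 1) n_splits) n_splits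
  else (results, idx)
termination_by rem.toNat
decreasing_by omega

-- second while loop: hand the extra positives out, continuing with the same idx.
def scsPLoop (results : List (Int × Int)) (rem : Int) (idx : Int) (n_splits : Int) :
    List (Int × Int) × Int :=
  if 0 < rem then
    let r := results.getD idx.toNat (0, 0)
    scsPLoop (results.set idx.toNat (r.1, r.2 + 1)) (rem - 1)
      (PySem.Int.mod (idx + 1) n_splits) n_splits
  else (results, idx)
termination_by rem.toNat
decreasing_by omega

def stratified_configurations_sklearn (p : Int) (n : Int) (n_splits : Int) : List (Int × Int) :=
  let p_base := PySem.Int.floordiv p n_splits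
  let n_base := PySem.Int.floordiv n n_splits
  let p_remainder := PySem.Int.mod p n_splits
  let n_remainder := PySem.Int.mod n n_splits
  let results := List.replicate n_splits.toNat (n_base, p_base)
  let st := scsNLoop results n_remainder 0 n_splits
  (scsPLoop st.1 p_remainder st.2 n_splits).1

def determine_fold_configurations (p : Int) (n : Int) (n_folds : Int) (n_repeats : Int) (folding : String) : List (List (String × Int)) :=
  if folding == "stratified_sklearn" then
    let confs := (stratified_configurations_sklearn p n n_folds).map
      (fun conf => [("n", conf.1), ("p", conf.2)])
    (List.range n_repeats.toNat).foldl
      (fun results _ => confs.foldl (fun results item => results ++ [item]) results) []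
  else []  -- Python raises ValueError here; excluded by Pre_

-- ===== PORT B =====
def determine_fold_configurations_alt (p : Int) (n : Int) (n_folds : Int) (n_repeats : Int) (folding : String) : List (List (String × Int)) :=
  if folding == "stratified_sklearn" then
    match PySem.Int.divmod? p n_folds, PySem.Int.divmod? n n_folds with
    | some (p_base, p_rem), some (n_base, n_rem) =>
      (List.range n_repeats.toNat).flatMap (fun _ =>
        (List.range n_folds.toNat).map (fun (i : Nat) =>
          [("n", n_base + (if (i : Int) < n_rem then 1 else 0)),
           ("p", p_base + (if PySem.Int.mod ((i : Int) - n_rem) n_folds < p_rem then 1 else 0))]))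
    | _, _ => []  -- divmod raises ZeroDivisionError here (n_folds = 0); excluded by Pre_
  else []  -- Python raises ValueError here; excluded by Pre_

-- ===== PRECONDITION & SPEC =====
-- Pre_ excludes exactly the inputs where the Python A raises: an unsupported folding string
-- (ValueError) and n_folds = 0 (ZeroDivisionError); A returns normally everywhere else.
def Pre_determine_fold_configurations (p : Int) (n : Int) (n_folds : Int) (n_repeats : Int) (folding : String) : Prop :=
  folding = "stratified_sklearn" ∧ n_folds ≠ 0
instance (p : Int) (n : Int) (n_folds : Int) (n_repeats : Int) (folding : String) : Decidable (Pre_determine_fold_configurations p n n_folds n_repeats folding) := by unfold Pre_determine_fold_configurations; infer_instance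

def pvWitness_determine_fold_configurations : Int × Int × Int × Int × String := (10, 7, 3, 2, "stratified_sklearn")

def Spec_determine_fold_configurations (p : Int) (n : Int) (n_folds : Int) (n_repeats : Int) (folding : String) (out : List (List (String × Int))) : Prop := out = determine_fold_configurations_alt p n n_folds n_repeats folding
instance (p : Int) (n : Int) (n_folds : Int) (n_repeats : Int) (folding : String) (out : List (List (String × Int))) : Decidable (Spec_determine_fold_configurations p n n_folds n_repeats folding out) := by unfold Spec_determine_fold_configurations; infer_instance

-- ===== CLAIM (what is proved, stated in full; the proofs are below) =====
def Claim_equal_determine_fold_configurations : Prop := ∀ (p : Int) (n : Int) (n_folds : Int) (n_repeats : Int) (folding : String), Dom_determine_fold_configurations p n n_folds n_repeats folding → Pre_determine_fold_configurations p n n_folds n_repeats folding → Spec_determine_fold_configurations p n n_folds n_repeats folding (determine_fold_configurations p n n_folds n_repeats folding)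

-- ===== LEMMAS AND PROOFS =====

-- how many times the rotating index, started at idx and advanced k times mod ns, lands on i
def hits (k : Nat) (idx : Int) (i : Int) (ns : Int) : Int :=
  match k with
  | 0 => 0
  | k + 1 => (if idx = i then 1 else 0) + hits k (PySem.Int.mod (idx + 1) ns) i ns

lemma ploop_spec (k : Nat) : ∀ (res : List (Int × Int)) (idx ns : Int),
    0 < ns → res.length = ns.toNat → 0 ≤ idx → idx < ns →
    scsPLoop res (k : Int) idx ns =
      (res.mapIdx (fun i pr => (pr.1, pr.2 + hits k idx (i : Int) ns)),
       PySem.Int.mod (idx + k) ns) := by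
  induction k with
  | zero =>
    intro res idx ns hns hlen h0 h1
    rw [scsPLoop]
    simp only [Int.natCast_zero, lt_irrefl, if_false, hits, add_zero]
    rw [PySem.Int.mod_eq_emod_of_pos hns, Int.emod_eq_of_lt h0 h1]
    refine Prod.ext ?_ rfl
    apply List.ext_getElem <;> simp
  | succ k ih =>
    intro res idx ns hns hlen h0 h1
    have hidx : idx.toNat < res.length := by omega
    rw [scsPLoop]
    rw [if_pos (by push_cast; omega)]
    have h0' : 0 ≤ PySem.Int.mod (idx + 1) ns := PySem.Int.mod_nonneg _ hns
    have h1' : PySem.Int.mod (idx + 1) ns < ns := PySem.Int.mod_lt _ hns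
    have hc : ((k + 1 : Nat) : Int) - 1 = (k : Nat) := by push_cast; ring
    rw [hc, ih _ _ _ hns (by simp [hlen]) h0' h1']
    refine Prod.ext ?_ ?_
    · show List.mapIdx _ _ = List.mapIdx (fun i pr => (pr.1, pr.2 + hits (k+1) idx (i : Int) ns)) res
      apply List.ext_getElem
      · simp
      · intro j hj1 hj2
        simp only [List.getElem_mapIdx, List.getD_eq_getElem _ _ hidx]
        by_cases hji : idx.toNat = j
        · subst hji
          have hidxj : idx = (idx.toNat : Int) := by omega
          rw [List.getElem_set_self]
          simp only [hits, if_pos hidxj]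
          exact Prod.ext rfl (by ring)
        · have hidxj : ¬ idx = (j : Int) := by omega
          rw [List.getElem_set_ne hji]
          simp only [hits, if_neg hidxj, zero_add]
    · show PySem.Int.mod (PySem.Int.mod (idx + 1) ns + (k:Int)) ns = PySem.Int.mod (idx + ((k+1 : Nat):Int)) ns
      simp only [PySem.Int.mod_eq_emod_of_pos hns, Int.emod_add_emod]
      push_cast; ring_nf

lemma nloop_spec (k : Nat) : ∀ (res : List (Int × Int)) (idx ns : Int),
    0 < ns → res.length = ns.toNat → 0 ≤ idx → idx < ns →
    scsNLoop res (k : Int) idx ns =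
      (res.mapIdx (fun i pr => (pr.1 + hits k idx (i : Int) ns, pr.2)),
       PySem.Int.mod (idx + k) ns) := by
  induction k with
  | zero =>
    intro res idx ns hns hlen h0 h1
    rw [scsNLoop]
    simp only [Int.natCast_zero, lt_irrefl, if_false, hits, add_zero]
    rw [PySem.Int.mod_eq_emod_of_pos hns, Int.emod_eq_of_lt h0 h1]
    refine Prod.ext ?_ rfl
    apply List.ext_getElem <;> simp
  | succ k ih =>
    intro res idx ns hns hlen h0 h1
    have hidx : idx.toNat < res.length := by omega
    rw [scsNLoop]
    rw [if_pos (by push_cast; omega)]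
    have h0' : 0 ≤ PySem.Int.mod (idx + 1) ns := PySem.Int.mod_nonneg _ hns
    have h1' : PySem.Int.mod (idx + 1) ns < ns := PySem.Int.mod_lt _ hns
    have hc : ((k + 1 : Nat) : Int) - 1 = (k : Nat) := by push_cast; ring
    rw [hc, ih _ _ _ hns (by simp [hlen]) h0' h1']
    refine Prod.ext ?_ ?_
    · show List.mapIdx _ _ = List.mapIdx (fun i pr => (pr.1 + hits (k+1) idx (i : Int) ns, pr.2)) res
      apply List.ext_getElem
      · simp
      · intro j hj1 hj2
        simp only [List.getElem_mapIdx, List.getD_eq_getElem _ _ hidx]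
        by_cases hji : idx.toNat = j
        · subst hji
          have hidxj : idx = (idx.toNat : Int) := by omega
          rw [List.getElem_set_self]
          simp only [hits, if_pos hidxj]
          exact Prod.ext (by ring) rfl
        · have hidxj : ¬ idx = (j : Int) := by omega
          rw [List.getElem_set_ne hji]
          simp only [hits, if_neg hidxj, zero_add]
    · show PySem.Int.mod (PySem.Int.mod (idx + 1) ns + (k:Int)) ns = PySem.Int.mod (idx + ((k+1 : Nat):Int)) ns
      simp only [PySem.Int.mod_eq_emod_of_pos hns, Int.emod_add_emod]
      push_cast; ring_nf

lemma hits_closed (k : Nat) : ∀ (idx i ns : Int),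
    0 < ns → 0 ≤ idx → idx < ns → 0 ≤ i → i < ns → (k : Int) ≤ ns →
    hits k idx i ns = if PySem.Int.mod (i - idx) ns < (k : Int) then 1 else 0 := by
  induction k with
  | zero =>
    intro idx i ns hns h0 h1 hi0 hi1 hk
    have := PySem.Int.mod_nonneg (i - idx) hns
    rw [if_neg (by push_cast; omega)]
    rfl
  | succ k ih =>
    intro idx i ns hns h0 h1 hi0 hi1 hk
    have hmm : ∀ x : Int, -ns ≤ x → x < ns → PySem.Int.mod x ns = if 0 ≤ x then x else x + ns := by
      intro x hx1 hx2
      rw [PySem.Int.mod_eq_emod_of_pos hns]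
      split
      · exact Int.emod_eq_of_lt ‹_› hx2
      · rw [← Int.add_emod_right]; exact Int.emod_eq_of_lt (by omega) (by omega)
    have hk' : ((k : Nat) : Int) ≤ ns := by push_cast at hk ⊢; omega
    by_cases hlt : idx + 1 < ns
    · have he : PySem.Int.mod (idx + 1) ns = idx + 1 := by
        rw [hmm _ (by omega) hlt, if_pos (by omega)]
      rw [hits, he, ih (idx + 1) i ns hns (by omega) hlt hi0 hi1 hk',
        hmm (i - idx) (by omega) (by omega), hmm (i - (idx + 1)) (by omega) (by omega)]
      push_cast
      split_ifs <;> omega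
    · have he : PySem.Int.mod (idx + 1) ns = 0 := by
        have h1' : idx + 1 = ns := by omega
        rw [h1', PySem.Int.mod_eq_emod_of_pos hns, Int.emod_self]
      rw [hits, he, ih 0 i ns hns le_rfl hns hi0 hi1 hk',
        hmm (i - idx) (by omega) (by omega), hmm (i - 0) (by omega) (by omega)]
      push_cast
      split_ifs <;> omega

lemma divmod?_of_ne (a b : Int) (h : b ≠ 0) :
    PySem.Int.divmod? a b = some (PySem.Int.floordiv a b, PySem.Int.mod a b) := by
  simp [PySem.Int.divmod?, PySem.Int.floordiv, PySem.Int.mod, h]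

lemma scs_eq (p n ns : Int) (hns : 0 < ns) :
    stratified_configurations_sklearn p n ns =
      (List.range ns.toNat).map (fun (i : Nat) =>
        (PySem.Int.floordiv n ns + (if (i : Int) < PySem.Int.mod n ns then 1 else 0),
         PySem.Int.floordiv p ns + (if PySem.Int.mod ((i : Int) - PySem.Int.mod n ns) ns < PySem.Int.mod p ns then 1 else 0))) := by
  have hnr0 : 0 ≤ PySem.Int.mod n ns := PySem.Int.mod_nonneg _ hns
  have hnr1 : PySem.Int.mod n ns < ns := PySem.Int.mod_lt _ hns
  have hpr0 : 0 ≤ PySem.Int.mod p ns := PySem.Int.mod_nonneg _ hns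
  have hpr1 : PySem.Int.mod p ns < ns := PySem.Int.mod_lt _ hns
  have hcn : ((PySem.Int.mod n ns).toNat : Int) = PySem.Int.mod n ns := Int.toNat_of_nonneg hnr0
  have hcp : ((PySem.Int.mod p ns).toNat : Int) = PySem.Int.mod p ns := Int.toNat_of_nonneg hpr0
  have hfix : PySem.Int.mod (PySem.Int.mod n ns) ns = PySem.Int.mod n ns := by
    conv_lhs => rw [PySem.Int.mod_eq_emod_of_pos hns]
    exact Int.emod_eq_of_lt hnr0 hnr1
  have step1 : scsNLoop (List.replicate ns.toNat (PySem.Int.floordiv n ns, PySem.Int.floordiv p ns))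
      (PySem.Int.mod n ns) 0 ns =
      ((List.replicate ns.toNat (PySem.Int.floordiv n ns, PySem.Int.floordiv p ns)).mapIdx
        (fun i pr => (pr.1 + hits (PySem.Int.mod n ns).toNat 0 (i : Int) ns, pr.2)),
       PySem.Int.mod n ns) := by
    conv_lhs => rw [← hcn]
    rw [nloop_spec _ _ _ _ hns (by simp) le_rfl hns, zero_add, hcn, hfix]
  have step2 : ∀ res : List (Int × Int), res.length = ns.toNat →
      (scsPLoop res (PySem.Int.mod p ns) (PySem.Int.mod n ns) ns).1 =
      res.mapIdx (fun i pr => (pr.1, pr.2 + hits (PySem.Int.mod p ns).toNat (PySem.Int.mod n ns) (i : Int) ns)) := by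
    intro res hlen
    conv_lhs => rw [← hcp]
    rw [ploop_spec _ _ _ _ hns hlen hnr0 hnr1]
  show (scsPLoop (scsNLoop (List.replicate ns.toNat (PySem.Int.floordiv n ns, PySem.Int.floordiv p ns))
      (PySem.Int.mod n ns) 0 ns).1 (PySem.Int.mod p ns)
      (scsNLoop (List.replicate ns.toNat (PySem.Int.floordiv n ns, PySem.Int.floordiv p ns))
        (PySem.Int.mod n ns) 0 ns).2 ns).1 = _
  rw [step1]
  rw [step2 _ (by simp)]
  apply List.ext_getElem
  · simp
  · intro j hj1 hj2
    have hjlen : j < ns.toNat := by simpa using hj2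
    have hj0 : (0:Int) ≤ (j:Int) := by omega
    have hjns : (j:Int) < ns := by omega
    simp only [List.getElem_mapIdx, List.getElem_replicate, List.getElem_map, List.getElem_range]
    rw [hits_closed _ _ _ _ hns le_rfl hns hj0 hjns (by omega),
        hits_closed _ _ _ _ hns hnr0 hnr1 hj0 hjns (by omega)]
    have hjfix : PySem.Int.mod ((j:Int)) ns = (j:Int) := by
      rw [PySem.Int.mod_eq_emod_of_pos hns]
      exact Int.emod_eq_of_lt hj0 hjns
    rw [hcn, hcp, sub_zero, hjfix]

lemma scs_nil (p n ns : Int) (hns : ns < 0) : stratified_configurations_sklearn p n ns = [] := by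
  have h0 : ns.toNat = 0 := by omega
  have hnr : PySem.Int.mod n ns ≤ 0 := (PySem.Int.mod_neg_bounds n hns).2
  have hpr : PySem.Int.mod p ns ≤ 0 := (PySem.Int.mod_neg_bounds p hns).2
  show (scsPLoop (scsNLoop (List.replicate ns.toNat _) (PySem.Int.mod n ns) 0 ns).1
      (PySem.Int.mod p ns) _ ns).1 = []
  rw [scsNLoop, if_neg (by omega)]
  rw [scsPLoop, if_neg (by omega)]
  simp [h0]

-- ===== VERDICT (by name: the statement is the Claim_ definition above) =====
theorem determine_fold_configurations_spec : Claim_equal_determine_fold_configurations := by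
  intro p n nf nr folding _ hpre
  obtain ⟨hf, hnf⟩ := hpre
  subst hf
  show determine_fold_configurations p n nf nr _ = determine_fold_configurations_alt p n nf nr _
  rw [determine_fold_configurations, determine_fold_configurations_alt]
  simp only [beq_self_eq_true, if_pos]
  rw [divmod?_of_ne _ _ hnf, divmod?_of_ne _ _ hnf]
  simp only [PySem.List.foldl_append_singleton_eq_self]
  rw [PySem.List.foldl_append_eq_flatMap]
  rw [List.nil_append]
  congr 1
  funext _
  rcases lt_or_gt_of_ne hnf with hlt | hgt
  · rw [scs_nil p n nf hlt]
    have : nf.toNat = 0 := by omega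
    simp [this]
  · rw [scs_eq p n nf hgt, List.map_map]
    rfl
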